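-- pv_equiv track=rewrite | github.com/cobaltspeech/examples-python | cubic/webrtc_client.py | sdpPionFix
-- ===== SOURCE A (Python) =====
-- def sdpPionFix(sdp):
--     ufrag = None
--     icePwd = None
--     newOfferSdp = ""
--     for item in sdp.split('\n'):
--         if "a=ice-ufrag" in item:
--             if ufrag is None:
--                 ufrag=item
--             newOfferSdp+=ufrag+"\n"
--         else:
--             if "a=ice-pwd:" in item:
--                 if icePwd is None:
--                     icePwd=item
--                 newOfferSdp+=icePwd+"\n"
--             else:
--                 newOfferSdp+=item+"\n"
--     return newOfferSdp
-- ===== SOURCE B (Python) =====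
-- def sdpPionFix(sdp):
--     lines = sdp.split('\n')
--     ufrag = next((l for l in lines if "a=ice-ufrag" in l), None)
--     pwd = next((l for l in lines if "a=ice-ufrag" not in l and "a=ice-pwd:" in l), None)
--     out = [ufrag if "a=ice-ufrag" in l
--            else pwd if "a=ice-pwd:" in l
--            else l
--            for l in lines]
--     return "".join(x + "\n" for x in out)
-- ===== Notes on version B (the rewrite author's own statement) =====
-- stated objective: simpler
-- what changed: the single stateful accumulator loop is replaced by a first pass that finds the canonical ufrag line and the canonical pwd line, a comprehension that maps every line to its replacement, and one final join
import Mathlib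
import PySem

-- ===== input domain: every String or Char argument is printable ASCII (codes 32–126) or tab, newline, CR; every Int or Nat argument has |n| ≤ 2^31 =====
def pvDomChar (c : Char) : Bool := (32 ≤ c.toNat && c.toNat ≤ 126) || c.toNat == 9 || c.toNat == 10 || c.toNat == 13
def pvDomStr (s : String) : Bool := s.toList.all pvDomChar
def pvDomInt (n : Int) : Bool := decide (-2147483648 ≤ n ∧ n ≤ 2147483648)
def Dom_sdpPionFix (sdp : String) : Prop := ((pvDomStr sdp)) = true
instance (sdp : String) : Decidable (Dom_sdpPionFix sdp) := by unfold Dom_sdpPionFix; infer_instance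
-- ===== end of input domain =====

-- B replaces A's single stateful accumulator loop by a find-first pass plus a map-and-join pass (objective: simpler).

-- the two literal substrings both Pythons test with 'in' (strings as List Char, exact on the domain)
def ufragNeedle : List Char := "a=ice-ufrag".toList
def icePwdNeedle : List Char := "a=ice-pwd:".toList

-- ===== PORT A =====
-- the for-loop of A, state = (ufrag, icePwd, newOfferSdp)
def sdpPionFixLoop : List (List Char) → Option (List Char) × Option (List Char) × List Char → List Char
  | [], (_, _, acc) => acc
  | item :: rest, (ufrag, icePwd, acc) =>
    if PySem.Chars.isIn ufragNeedle item then
      let u := match ufrag with | none => item | some x => x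
      sdpPionFixLoop rest (some u, icePwd, acc ++ u ++ ['\n'])
    else if PySem.Chars.isIn icePwdNeedle item then
      let p := match icePwd with | none => item | some x => x
      sdpPionFixLoop rest (ufrag, some p, acc ++ p ++ ['\n'])
    else
      sdpPionFixLoop rest (ufrag, icePwd, acc ++ item ++ ['\n'])

def sdpPionFix (sdp : String) : String :=
  String.ofList (sdpPionFixLoop (PySem.Chars.splitOn sdp.toList "\n".toList) (none, none, []))

-- ===== PORT B =====
def sdpPionFix_alt (sdp : String) : String :=
  let lines := PySem.Chars.splitOn sdp.toList "\n".toList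
  let ufrag := lines.find? (fun l => PySem.Chars.isIn ufragNeedle l)
  let pwd := lines.find? (fun l => !PySem.Chars.isIn ufragNeedle l && PySem.Chars.isIn icePwdNeedle l)
  let out := lines.map (fun l =>
      if PySem.Chars.isIn ufragNeedle l then ufrag.getD []   -- default unreachable: ufrag found on this very line
      else if PySem.Chars.isIn icePwdNeedle l then pwd.getD []
      else l)
  String.ofList (PySem.Chars.join [] (out.map (fun x => x ++ ['\n'])))

-- ===== PRECONDITION & SPEC =====
def Spec_sdpPionFix (sdp : String) (out : String) : Prop := out = sdpPionFix_alt sdp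
instance (sdp : String) (out : String) : Decidable (Spec_sdpPionFix sdp out) := by unfold Spec_sdpPionFix; infer_instance

-- ===== CLAIM (what is proved, stated in full; the proofs are below) =====
def Claim_equal_sdpPionFix : Prop := ∀ (sdp : String), Dom_sdpPionFix sdp → Spec_sdpPionFix sdp (sdpPionFix sdp)

-- ===== LEMMAS AND PROOFS =====

theorem join_nil_sep (l : List (List Char)) : PySem.Chars.join [] l = l.flatten := by
  induction l with
  | nil => simp [PySem.Chars.join_nil]
  | cons a t ih =>
    cases t with
    | nil => simp [PySem.Chars.join_singleton]
    | cons b t' => simp only [PySem.Chars.join_cons_cons, List.flatten_cons] at *; simp [ih]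

-- invariant of A's loop: with ufrag/icePwd already holding u/p, the loop appends B's map of the
-- remaining lines, where each replacement is the held line if any, else the first matching remaining line
theorem loop_eq (lines : List (List Char)) :
    ∀ (u p : Option (List Char)) (acc : List Char),
    sdpPionFixLoop lines (u, p, acc) =
      acc ++ (lines.map (fun l =>
        (if PySem.Chars.isIn ufragNeedle l then
            u.getD ((lines.find? (fun l => PySem.Chars.isIn ufragNeedle l)).getD [])
         else if PySem.Chars.isIn icePwdNeedle l then
            p.getD ((lines.find? (fun l =>
               !PySem.Chars.isIn ufragNeedle l && PySem.Chars.isIn icePwdNeedle l)).getD [])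
         else l) ++ ['\n'])).flatten := by
  induction lines with
  | nil => intro u p acc; simp [sdpPionFixLoop]
  | cons item rest ih =>
    intro u p acc
    by_cases hu : PySem.Chars.isIn ufragNeedle item = true
    · cases u with
      | none =>
        simp only [sdpPionFixLoop, hu, if_true, List.find?_cons, Bool.not_true, Bool.false_and,
          List.map_cons, List.flatten_cons, ih, Option.getD_none,
          Option.getD_some, List.append_assoc, List.cons_append, List.nil_append]
      | some x =>
        simp only [sdpPionFixLoop, hu, if_true, List.find?_cons, Bool.not_true, Bool.false_and,
          List.map_cons, List.flatten_cons, ih,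
          Option.getD_some, List.append_assoc, List.cons_append, List.nil_append]
    · by_cases hp : PySem.Chars.isIn icePwdNeedle item = true
      · cases p with
        | none =>
          simp only [sdpPionFixLoop, hu, hp, if_true, if_false, Bool.not_false, Bool.true_and,
            List.find?_cons, List.map_cons, List.flatten_cons, ih, Option.getD_none,
            Option.getD_some, List.append_assoc, List.cons_append,
            List.nil_append, Bool.false_eq_true]
        | some x =>
          simp only [sdpPionFixLoop, hu, hp, if_true, if_false, Bool.not_false, Bool.true_and,
            List.find?_cons, List.map_cons, List.flatten_cons, ih,
            Option.getD_some, List.append_assoc, List.cons_append, List.nil_append,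
            Bool.false_eq_true]
      · simp only [sdpPionFixLoop, hu, hp, List.find?_cons, Bool.not_false, Bool.true_and,
          List.map_cons, List.flatten_cons, ih, List.append_assoc, List.cons_append,
          List.nil_append, Bool.false_eq_true, ite_false]

-- ===== VERDICT (by name: the statement is the Claim_ definition above) =====
theorem sdpPionFix_spec : Claim_equal_sdpPionFix := by
  intro sdp _
  show sdpPionFix sdp = sdpPionFix_alt sdp
  simp only [sdpPionFix, sdpPionFix_alt, loop_eq, join_nil_sep, List.map_map, List.nil_append,
    Option.getD_none, Function.comp_def]
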